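-- pv_equiv track=rewrite | github.com/seife/RaspyRFM | apps/rcprotocols.py | _decode_int
-- ===== SOURCE A (Python) =====
-- def _decode_int(tristateval):
-- 	i = 0
-- 	while tristateval != "":
-- 		i <<= 1
-- 		if tristateval[-1] != '0':
-- 			i |= 1
-- 		tristateval = tristateval[:-1]
-- 	return i
-- ===== SOURCE B (Python) =====
-- def _decode_int(tristateval):
-- 	bits = ''.join('1' if c != '0' else '0' for c in reversed(tristateval))
-- 	if bits == "":
-- 		return 0
-- 	return int(bits, 2)
-- ===== Notes on version B (the rewrite author's own statement) =====
-- stated objective: faster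
-- what changed: Replaces the shift-and-OR while loop that repeatedly slices the string (quadratic copying) by a single reversed map to binary digits followed by a base-2 parse via int(bits, 2).
import Mathlib
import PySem

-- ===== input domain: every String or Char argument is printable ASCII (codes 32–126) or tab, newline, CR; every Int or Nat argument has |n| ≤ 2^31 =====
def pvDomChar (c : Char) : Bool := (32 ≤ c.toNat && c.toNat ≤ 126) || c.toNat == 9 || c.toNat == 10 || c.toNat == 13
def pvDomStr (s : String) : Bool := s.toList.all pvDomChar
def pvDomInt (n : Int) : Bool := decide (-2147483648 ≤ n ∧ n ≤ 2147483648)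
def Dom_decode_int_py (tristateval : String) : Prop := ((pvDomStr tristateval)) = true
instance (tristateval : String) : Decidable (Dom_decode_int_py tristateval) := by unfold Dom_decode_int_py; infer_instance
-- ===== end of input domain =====

-- ===== PORT A =====
-- B replaces the shift-and-OR while loop over repeatedly-sliced strings by a reversed
-- map to binary digits followed by a base-2 parse (objective: faster, measured).

-- `while tristateval != "": i <<= 1; if tristateval[-1] != '0': i |= 1; tristateval = tristateval[:-1]`
-- (i |= 1 is `Int.lor i 1`; inside the loop the string is nonempty, so s[-1] is its last char)
def pvLoopA (l : List Char) (i : Int) : Int :=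
  if h : l = [] then i
  else
    let i1 := i <<< (1 : Nat)
    let i2 := if l.getLast h ≠ '0' then Int.lor i1 1 else i1
    pvLoopA l.dropLast i2
termination_by l.length
decreasing_by
  simp only [List.length_dropLast]
  exact Nat.sub_lt (List.length_pos_iff.mpr h) Nat.one_pos

def decode_int_py (tristateval : String) : Int := pvLoopA tristateval.toList 0

-- ===== PORT B =====
-- hand port of int(bits, 2), exact because bits consists only of '0' and '1'
def pvParse2 (bits : List Char) : Int :=
  bits.foldl (fun acc c => acc * 2 + (if c = '1' then 1 else 0)) 0

def decode_int_py_alt (tristateval : String) : Int :=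
  let bits := tristateval.toList.reverse.map (fun c => if c ≠ '0' then '1' else '0')
  if bits = [] then 0 else pvParse2 bits

-- ===== PRECONDITION & SPEC =====
def Spec_decode_int_py (tristateval : String) (out : Int) : Prop := out = decode_int_py_alt tristateval
instance (tristateval : String) (out : Int) : Decidable (Spec_decode_int_py tristateval out) := by unfold Spec_decode_int_py; infer_instance

-- ===== CLAIM (what is proved, stated in full; the proofs are below) =====
def Claim_equal_decode_int_py : Prop := ∀ (tristateval : String), Dom_decode_int_py tristateval → Spec_decode_int_py tristateval (decode_int_py tristateval)

-- ===== LEMMAS AND PROOFS =====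

theorem pvShiftOr (n : Nat) : Int.lor ((n : Int) <<< (1 : Nat)) 1 = ((2 * n + 1 : Nat) : Int) := by
  have hsh : ((n : Int) <<< (1 : Nat)) = ((n <<< 1 : Nat) : Int) := by exact_mod_cast rfl
  have hlor : Int.lor ((n <<< 1 : Nat) : Int) (((1 : Nat)) : Int) = (((n <<< 1) ||| 1 : Nat) : Int) := rfl
  simp only [Nat.cast_one] at hlor
  rw [hsh, hlor]
  congr 1
  have h := Nat.shiftLeft_add_eq_or_of_lt (a := n) (b := 1) (i := 1) (by omega)
  rw [Nat.shiftLeft_eq, pow_one] at h ⊢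
  omega

theorem pvShiftEven (n : Nat) : ((n : Int) <<< (1 : Nat)) = ((2 * n : Nat) : Int) := by
  have hsh : ((n : Int) <<< (1 : Nat)) = ((n <<< 1 : Nat) : Int) := by exact_mod_cast rfl
  rw [hsh]
  congr 1

theorem pvLoopA_eq (l : List Char) (n : Nat) :
    pvLoopA l (n : Int) =
      (l.reverse.map (fun c => if c ≠ '0' then '1' else '0')).foldl
        (fun acc c => acc * 2 + (if c = '1' then 1 else 0)) (n : Int) := by
  induction l using List.reverseRecOn generalizing n with
  | nil => rw [pvLoopA]; simp
  | append_singleton l c ih =>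
    rw [pvLoopA]
    simp only [dif_neg (by simp : ¬(l ++ [c] = [])), List.getLast_concat, List.dropLast_concat,
      List.reverse_append, List.reverse_singleton, List.singleton_append, List.map_cons,
      List.foldl_cons]
    by_cases hc : c = '0'
    · simp only [hc, ne_eq, not_true_eq_false, if_false, if_neg (by decide : ¬('0' : Char) = '1')]
      rw [pvShiftEven, ih]
      congr 1
      push_cast; ring
    · simp only [ne_eq, hc, not_false_eq_true, if_true]
      rw [pvShiftOr, ih]
      congr 1
      push_cast; ring

-- ===== VERDICT (by name: the statement is the Claim_ definition above) =====
theorem decode_int_py_spec : Claim_equal_decode_int_py := by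
  intro s _
  unfold Spec_decode_int_py decode_int_py decode_int_py_alt pvParse2
  have h := pvLoopA_eq s.toList 0
  simp only [Nat.cast_zero] at h
  rw [h]
  by_cases he : s.toList = []
  · simp [he]
  · rw [if_neg (by simp [he])]
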